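-- pv_equiv track=rewrite | github.com/Bubobubobubobubo/sardine | sardine_core/sequences/sardine_parser/funclib.py | binary_rhythm_generator
-- ===== SOURCE A (Python) =====
-- def binary_rhythm_generator(
--     input_number: int | float, rotation: int | float = [0]
-- ):
--     """
--     Generate rhythms by converting an integer to binary representation.
--     Everything is then converted in a rhythm using the same technique
--     as the euclidian rhythm generator
--     """
--     rotation = int(rotation[0])
--     number_as_list = [int(x) for x in list("{0:0b}".format(int(input_number[0])))]
--     if rotation != 0:
--         number_as_list = number_as_list[-rotation:] + number_as_list[:-rotation]
--
--     def convert(input_list):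
--         input_list = int("".join([str(i) for i in input_list]))
--
--         def convert_code(number):
--             count, result = 0, []
--             for digit in str(number):
--                 if digit == "1":
--                     if count > 0:
--                         result.append(count)
--                     count = 1
--                 elif digit == "0":
--                     count += 1
--             if count > 0:
--                 result.append(count)
--             return result
--
--         return convert_code(input_list)
--
--     result = convert(number_as_list)
--     return result
-- ===== SOURCE B (Python) =====
-- def binary_rhythm_generator(
--     input_number: int | float, rotation: int | float = [0]
-- ):
--     rotation = int(rotation[0])
--     bits = [int(x) for x in "{0:0b}".format(int(input_number[0]))]
--     if rotation != 0:
--         bits = bits[-rotation:] + bits[:-rotation]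
--     s = str(int("".join(str(b) for b in bits)))
--     zeros = [seg.count("0") for seg in s.split("1")]
--     return ([zeros[0]] if zeros[0] > 0 else []) + [1 + z for z in zeros[1:]]
-- ===== Notes on version B (the rewrite author's own statement) =====
-- stated objective: simpler
-- what changed: A's running-counter loop over the digit string (flushing the counter at each '1' and at the end) is replaced by splitting the string on '1' and counting the '0's of each segment: the result is the first segment's zero count (if positive) followed by 1 + zero-count for every later segment.
import Mathlib
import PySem

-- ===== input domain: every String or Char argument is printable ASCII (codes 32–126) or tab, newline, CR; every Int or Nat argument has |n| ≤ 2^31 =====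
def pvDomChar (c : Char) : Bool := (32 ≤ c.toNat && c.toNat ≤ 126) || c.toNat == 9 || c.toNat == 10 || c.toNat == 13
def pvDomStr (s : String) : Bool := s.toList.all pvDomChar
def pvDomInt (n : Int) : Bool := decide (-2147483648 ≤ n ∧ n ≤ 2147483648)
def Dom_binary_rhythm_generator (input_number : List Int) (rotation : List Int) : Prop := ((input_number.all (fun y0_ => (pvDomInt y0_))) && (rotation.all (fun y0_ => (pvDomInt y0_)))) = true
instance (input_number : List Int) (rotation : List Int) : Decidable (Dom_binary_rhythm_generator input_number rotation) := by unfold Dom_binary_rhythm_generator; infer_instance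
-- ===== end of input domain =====

-- B replaces A's running-counter/flush loop over the digit string by splitting the string on '1'
-- and counting '0's per segment (objective: simpler; same preprocessing, no speed claim).

-- ===== PORT A =====
-- convert_code's for-loop over str(number): state (count, result), branches in Python order
def brgLoop : List Char → Int → List Int → List Int
  | [], count, result => if 0 < count then result ++ [count] else result
  | digit :: rest, count, result =>
    if digit = '1' then brgLoop rest 1 (if 0 < count then result ++ [count] else result)
    else if digit = '0' then brgLoop rest (count + 1) result
    else brgLoop rest count result

def binary_rhythm_generator (input_number : List Int) (rotation : List Int) : List Int :=
  -- rotation[0] / input_number[0]: IndexError on empty list is excluded by Pre_ (pyGetD default never read inside Pre_)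
  let rot := PySem.List.pyGetD rotation 0 0
  -- [int(x) for x in list("{0:0b}".format(int(input_number[0])))]; int('-') (negative input) raises ValueError, excluded by Pre_
  let number_as_list := (PySem.Int.toBinChars (PySem.List.pyGetD input_number 0 0)).map
      (fun c => (PySem.Int.ofChars? [c]).getD 0)
  let number_as_list := if rot ≠ 0 then
      PySem.List.slice number_as_list (some (-rot)) none ++ PySem.List.slice number_as_list none (some (-rot))
    else number_as_list
  -- input_list = int("".join([str(i) for i in input_list])) — always a digit string, so int() returns
  let number := (PySem.Int.ofChars? ((number_as_list.map PySem.Int.toChars).flatten)).getD 0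
  brgLoop (PySem.Int.toChars number) 0 []

-- ===== PORT B =====
def binary_rhythm_generator_alt (input_number : List Int) (rotation : List Int) : List Int :=
  let rot := PySem.List.pyGetD rotation 0 0
  let bits := (PySem.Int.toBinChars (PySem.List.pyGetD input_number 0 0)).map
      (fun c => (PySem.Int.ofChars? [c]).getD 0)
  let bits := if rot ≠ 0 then
      PySem.List.slice bits (some (-rot)) none ++ PySem.List.slice bits none (some (-rot))
    else bits
  let s := PySem.Int.toChars ((PySem.Int.ofChars? ((bits.map PySem.Int.toChars).flatten)).getD 0)
  -- zeros = [seg.count("0") for seg in s.split("1")]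
  let zeros := (PySem.Chars.splitOn s ['1']).map (fun seg => (PySem.Chars.count seg ['0'] : Int))
  -- ([zeros[0]] if zeros[0] > 0 else []) + [1 + z for z in zeros[1:]]  (split() is never empty, so zeros[0] exists)
  (if 0 < PySem.List.pyGetD zeros 0 0 then [PySem.List.pyGetD zeros 0 0] else []) ++
    (PySem.List.slice zeros (some 1) none).map (fun z => 1 + z)

-- ===== PRECONDITION & SPEC =====
-- Pre_ excludes exactly the inputs where A raises: an empty input_number or rotation list (IndexError)
-- and a negative input_number[0] ("{0:0b}" then renders a '-', on which int(x) raises ValueError).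
def Pre_binary_rhythm_generator (input_number : List Int) (rotation : List Int) : Prop :=
  input_number ≠ [] ∧ rotation ≠ [] ∧ 0 ≤ input_number.headD 0
instance (input_number : List Int) (rotation : List Int) : Decidable (Pre_binary_rhythm_generator input_number rotation) := by unfold Pre_binary_rhythm_generator; infer_instance
def pvWitness_binary_rhythm_generator : List Int × List Int := ([20], [1])
def Spec_binary_rhythm_generator (input_number : List Int) (rotation : List Int) (out : List Int) : Prop := out = binary_rhythm_generator_alt input_number rotation
instance (input_number : List Int) (rotation : List Int) (out : List Int) : Decidable (Spec_binary_rhythm_generator input_number rotation out) := by unfold Spec_binary_rhythm_generator; infer_instance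

-- ===== CLAIM (what is proved, stated in full; the proofs are below) =====
def Claim_equal_binary_rhythm_generator : Prop := ∀ (input_number : List Int) (rotation : List Int), Dom_binary_rhythm_generator input_number rotation → Pre_binary_rhythm_generator input_number rotation → Spec_binary_rhythm_generator input_number rotation (binary_rhythm_generator input_number rotation)

-- ===== LEMMAS AND PROOFS =====

-- zeros before the first '1' (counting only '0' characters)
def zHead : List Char → Int
  | [] => 0
  | c :: t => if c = '1' then 0 else (if c = '0' then 1 else 0) + zHead t

-- per-'1' zero counts after each '1' (zeros up to the next '1' / the end)
def tCounts : List Char → List Int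
  | [] => []
  | c :: t => if c = '1' then zHead t :: tCounts t else tCounts t

-- functional split-on-'1' with an explicit current-segment accumulator
def sp1 : List Char → List Char → List (List Char)
  | pre, [] => [pre]
  | pre, c :: t => if c = '1' then pre :: sp1 [] t else sp1 (pre ++ [c]) t

theorem zHead_nonneg (cs : List Char) : 0 ≤ zHead cs := by
  induction cs with
  | nil => simp [zHead]
  | cons c t ih => simp only [zHead]; split_ifs <;> omega

theorem brgLoop_append (cs : List Char) : ∀ (count : Int) (res : List Int),
    brgLoop cs count res = res ++ brgLoop cs count [] := by
  induction cs with
  | nil => intro count res; simp only [brgLoop]; split_ifs <;> simp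
  | cons c t ih =>
    intro count res
    simp only [brgLoop]
    split_ifs with h1 h2 h2
    · rw [ih 1 (res ++ [count]), ih 1 ([] ++ [count])]; simp
    · rw [ih 1 res]
    · rw [ih (count + 1) res]
    · rw [ih count res]

theorem brgLoop_closed (cs : List Char) : ∀ (count : Int), 0 ≤ count →
    brgLoop cs count [] =
      (if 0 < count + zHead cs then [count + zHead cs] else []) ++ (tCounts cs).map (fun z => 1 + z) := by
  induction cs with
  | nil => intro count _; simp [brgLoop, zHead, tCounts]
  | cons c t ih =>
    intro count hc
    by_cases h1 : c = '1'
    · subst h1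
      simp only [brgLoop, zHead, tCounts]
      rw [brgLoop_append t 1, ih 1 (by omega)]
      have hz := zHead_nonneg t
      rw [if_pos (show (0 : Int) < 1 + zHead t by omega)]
      simp
    · by_cases h0 : c = '0'
      · simp only [brgLoop, zHead, tCounts, if_neg h1, if_pos h0]
        rw [ih (count + 1) (by omega)]
        rw [show count + 1 + zHead t = count + (1 + zHead t) from by ring]
      · simp only [brgLoop, zHead, tCounts, if_neg h1, if_neg h0]
        rw [ih count hc]
        simp

theorem splitOn_go_eq (sepp : List Char) : ∀ (fuel : Nat) (l cur : List Char) (acc : List (List Char)),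
    sepp = ['1'] → l.length ≤ fuel →
    PySem.Chars.splitOn.go sepp fuel l cur acc = acc.reverse ++ sp1 cur.reverse l := by
  intro fuel
  induction fuel with
  | zero =>
    intro l cur acc hsep hl
    have : l = [] := by cases l <;> simp_all
    subst this
    simp [PySem.Chars.splitOn.go, sp1]
  | succ f ih =>
    intro l cur acc hsep hl
    cases l with
    | nil => simp [PySem.Chars.splitOn.go, sp1]
    | cons c rest =>
      subst hsep
      have hlen : rest.length ≤ f := by simp only [List.length_cons] at hl; omega
      simp only [PySem.Chars.splitOn.go]
      by_cases hc : c = '1'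
      · subst hc
        rw [if_pos (by simp [List.isPrefixOf])]
        rw [show List.drop ['1'].length ('1' :: rest) = rest from by simp]
        rw [ih rest [] _ rfl hlen]
        simp [sp1]
      · rw [if_neg (by simp [List.isPrefixOf]; exact fun h => hc h.symm)]
        rw [ih rest (c :: cur) acc rfl hlen]
        simp [sp1, hc]

theorem splitOn_one_eq (s : List Char) : PySem.Chars.splitOn s ['1'] = sp1 [] s := by
  have := splitOn_go_eq ['1'] (s.length + 1) s [] [] rfl (by omega)
  simpa [PySem.Chars.splitOn] using this

theorem count_go_eq (sub : List Char) : ∀ (fuel : Nat) (l : List Char) (acc : Nat),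
    sub = ['0'] → l.length ≤ fuel →
    PySem.Chars.count.go sub fuel l acc = acc + l.count '0' := by
  intro fuel
  induction fuel with
  | zero =>
    intro l acc hsub hl
    have : l = [] := by cases l <;> simp_all
    subst this
    simp [PySem.Chars.count.go]
  | succ f ih =>
    intro l acc hsub hl
    cases l with
    | nil => simp [PySem.Chars.count.go]
    | cons c rest =>
      subst hsub
      have hlen : rest.length ≤ f := by simp only [List.length_cons] at hl; omega
      simp only [PySem.Chars.count.go]
      by_cases hc : c = '0'
      · subst hc
        rw [if_pos (by simp [List.isPrefixOf])]
        rw [show List.drop ['0'].length ('0' :: rest) = rest from by simp]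
        rw [ih rest (acc + 1) rfl hlen]
        simp
        omega
      · rw [if_neg (by simp [List.isPrefixOf]; exact fun h => hc h.symm)]
        rw [ih rest acc rfl hlen]
        simp [hc]

theorem count_zero_eq (seg : List Char) : PySem.Chars.count seg ['0'] = seg.count '0' := by
  have := count_go_eq ['0'] seg.length seg 0 rfl (by omega)
  simpa [PySem.Chars.count] using this

theorem map_count_sp1 (cs : List Char) : ∀ (pre : List Char),
    (sp1 pre cs).map (fun seg => (PySem.Chars.count seg ['0'] : Int)) =
      (((pre.count '0' : Nat) : Int) + zHead cs) :: tCounts cs := by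
  induction cs with
  | nil =>
    intro pre
    simp [sp1, zHead, tCounts, count_zero_eq]
  | cons c t ih =>
    intro pre
    by_cases h1 : c = '1'
    · simp only [sp1, zHead, tCounts, if_pos h1, List.map_cons]
      rw [ih []]
      simp [count_zero_eq]
    · by_cases h0 : c = '0'
      · simp only [sp1, zHead, tCounts, if_neg h1, if_pos h0]
        rw [ih (pre ++ [c])]
        congr 1
        subst h0
        simp [List.count_append]
        ring
      · simp only [sp1, zHead, tCounts, if_neg h1, if_neg h0]
        rw [ih (pre ++ [c])]
        congr 1
        simp [List.count_append, h0]

theorem core_eq (s : List Char) :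
    brgLoop s 0 [] =
      (let zeros := (PySem.Chars.splitOn s ['1']).map (fun seg => (PySem.Chars.count seg ['0'] : Int));
        (if 0 < PySem.List.pyGetD zeros 0 0 then [PySem.List.pyGetD zeros 0 0] else []) ++
          (PySem.List.slice zeros (some 1) none).map (fun z => 1 + z)) := by
  have hz : (PySem.Chars.splitOn s ['1']).map (fun seg => (PySem.Chars.count seg ['0'] : Int)) =
      zHead s :: tCounts s := by
    rw [splitOn_one_eq, map_count_sp1 s []]
    simp
  simp only [hz, PySem.List.pyGetD_zero_cons, PySem.List.slice_from_one, List.tail_cons]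
  rw [brgLoop_closed s 0 le_rfl]
  simp

-- ===== VERDICT (by name: the statement is the Claim_ definition above) =====
theorem binary_rhythm_generator_spec : Claim_equal_binary_rhythm_generator := by
  intro input_number rotation _ _
  unfold Spec_binary_rhythm_generator binary_rhythm_generator binary_rhythm_generator_alt
  exact core_eq _
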